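-- pv_equiv track=rewrite | github.com/alexmakassiouk/aoc23 | 11/main.py | get_empty_column_indices
-- ===== SOURCE A (Python) =====
-- def line_is_empty(line: str) -> bool:
--     for i in range(len(line)):
--         if line[i] == '#':
--             return False
--     return True
--
-- def get_empty_column_indices(lines: list) -> list:
--     empty_column_indices = []
--     for j in range(len(lines[0])):
--         column = ""
--         for i in range(len(lines)):
--             column += lines[i][j]
--
--         if line_is_empty(column):
--             empty_column_indices.append(j)
--     return empty_column_indices
-- ===== SOURCE B (Python) =====
-- def get_empty_column_indices(lines: list) -> list:
--     width = len(lines[0])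
--     nonempty = set()
--     for line in lines:
--         for j in range(width):
--             if line[j] == '#':
--                 nonempty.add(j)
--     return [j for j in range(width) if j not in nonempty]
-- ===== Notes on version B (the rewrite author's own statement) =====
-- stated objective: idiomatic
-- what changed: One row-major pass collecting the set of columns that contain '#', then a comprehension over the column range, instead of materialising each column as a string and rescanning it with line_is_empty.
import Mathlib
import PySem

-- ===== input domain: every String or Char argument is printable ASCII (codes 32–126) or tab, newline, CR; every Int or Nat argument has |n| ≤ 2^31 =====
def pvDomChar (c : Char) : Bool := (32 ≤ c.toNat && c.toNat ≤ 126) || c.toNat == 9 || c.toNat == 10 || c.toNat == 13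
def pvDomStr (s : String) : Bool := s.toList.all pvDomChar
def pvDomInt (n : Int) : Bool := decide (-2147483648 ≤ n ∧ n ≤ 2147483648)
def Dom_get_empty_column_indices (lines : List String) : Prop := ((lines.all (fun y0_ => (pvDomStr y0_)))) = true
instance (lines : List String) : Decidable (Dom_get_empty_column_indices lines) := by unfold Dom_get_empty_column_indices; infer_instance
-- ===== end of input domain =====

-- B replaces A's per-column string building and rescan by one row-major pass into a set of
-- non-empty column indices plus a comprehension over the column range (idiomatic; same cost).

-- ===== PORT A =====
-- character lines[i][j]; both indices are in range on every use inside Pre_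
def pvCharAt (lines : List String) (i j : Int) : Char :=
  PySem.List.pyGetD (PySem.List.pyGetD lines i "").toList j ' '

-- 'def line_is_empty(line)': loop over range(len(line)); the early 'return False' is the
-- same value as keeping the flag false for the rest of the fold
def line_is_empty (line : List Char) : Bool :=
  (PySem.List.pyRange 0 (line.length : Int) 1).foldl
    (fun ok i => if PySem.List.pyGetD line i ' ' == '#' then false else ok) true

def get_empty_column_indices (lines : List String) : List Int :=
  (PySem.List.pyRange 0 (PySem.Str.len (PySem.List.pyGetD lines 0 "")) 1).foldl
    (fun acc j =>
      let column : List Char :=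
        (PySem.List.pyRange 0 (lines.length : Int) 1).foldl
          (fun col i => col ++ [pvCharAt lines i j]) []
      if line_is_empty column then acc ++ [j] else acc) []

-- ===== PORT B =====
def get_empty_column_indices_alt (lines : List String) : List Int :=
  let width : Int := PySem.Str.len (PySem.List.pyGetD lines 0 "")
  let nonempty : PySem.Set Int :=
    lines.foldl
      (fun s line =>
        (PySem.List.pyRange 0 width 1).foldl
          (fun s j => if PySem.List.pyGetD line.toList j ' ' == '#' then PySem.Set.add s j else s)
          s)
      PySem.Set.empty
  (PySem.List.pyRange 0 width 1).filter (fun j => !(PySem.Set.contains nonempty j))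

-- ===== PRECONDITION & SPEC =====
-- Pre_ excludes exactly the inputs where A raises IndexError: the empty list (lines[0]) and
-- ragged inputs with a row shorter than the first row (lines[i][j]).
def Pre_get_empty_column_indices (lines : List String) : Prop :=
  lines ≠ [] ∧ ∀ s ∈ lines, (lines.headD "").toList.length ≤ s.toList.length
instance (lines : List String) : Decidable (Pre_get_empty_column_indices lines) := by
  unfold Pre_get_empty_column_indices; infer_instance
def pvWitness_get_empty_column_indices : List String := ["#.a", ".#.."]
def Spec_get_empty_column_indices (lines : List String) (out : List Int) : Prop := out = get_empty_column_indices_alt lines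
instance (lines : List String) (out : List Int) : Decidable (Spec_get_empty_column_indices lines out) := by unfold Spec_get_empty_column_indices; infer_instance

-- ===== CLAIM (what is proved, stated in full; the proofs are below) =====
def Claim_equal_get_empty_column_indices : Prop := ∀ (lines : List String), Dom_get_empty_column_indices lines → Pre_get_empty_column_indices lines → Spec_get_empty_column_indices lines (get_empty_column_indices lines)

-- ===== LEMMAS AND PROOFS =====

-- membership in the inner conditional-add fold
theorem mem_fold_add_if (p : Int → Prop) [DecidablePred p] (r : List Int) (s : PySem.Set Int) (x : Int) :
    x ∈ r.foldl (fun s j => if p j then PySem.Set.add s j else s) s ↔ x ∈ s ∨ (x ∈ r ∧ p x) := by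
  induction r generalizing s with
  | nil => simp
  | cons a t ih =>
    simp only [List.foldl_cons, ih]
    by_cases hpa : p a
    · simp only [if_pos hpa, PySem.Set.mem_add]
      constructor
      · rintro ((h | rfl) | ⟨hm, hp⟩)
        · exact Or.inl h
        · exact Or.inr ⟨List.mem_cons_self, hpa⟩
        · exact Or.inr ⟨List.mem_cons_of_mem _ hm, hp⟩
      · rintro (h | ⟨hm, hp⟩)
        · exact Or.inl (Or.inl h)
        · rcases List.mem_cons.mp hm with rfl | hm
          · exact Or.inl (Or.inr rfl)
          · exact Or.inr ⟨hm, hp⟩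
    · simp only [if_neg hpa]
      constructor
      · rintro (h | ⟨hm, hp⟩)
        · exact Or.inl h
        · exact Or.inr ⟨List.mem_cons_of_mem _ hm, hp⟩
      · rintro (h | ⟨hm, hp⟩)
        · exact Or.inl h
        · rcases List.mem_cons.mp hm with rfl | hm
          · exact absurd hp hpa
          · exact Or.inr ⟨hm, hp⟩

-- membership in B's nested fold: x is in the set iff some line has '#' at column x (x in range)
theorem mem_nonempty_fold (lines : List String) (w : Int) (s : PySem.Set Int) (x : Int) :
    x ∈ lines.foldl
      (fun s line => (PySem.List.pyRange 0 w 1).foldl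
        (fun s j => if PySem.List.pyGetD line.toList j ' ' == '#' then PySem.Set.add s j else s) s) s
    ↔ x ∈ s ∨ ∃ line ∈ lines, x ∈ PySem.List.pyRange 0 w 1 ∧ (PySem.List.pyGetD line.toList x ' ' == '#') = true := by
  induction lines generalizing s with
  | nil => simp
  | cons a t ih =>
    simp only [List.foldl_cons, ih,
      mem_fold_add_if (fun j => (PySem.List.pyGetD a.toList j ' ' == '#') = true)]
    constructor
    · rintro ((h | ⟨hr, hp⟩) | ⟨l, hl, hr, hp⟩)
      · exact Or.inl h
      · exact Or.inr ⟨a, List.mem_cons_self, hr, hp⟩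
      · exact Or.inr ⟨l, List.mem_cons_of_mem _ hl, hr, hp⟩
    · rintro (h | ⟨l, hl, hr, hp⟩)
      · exact Or.inl (Or.inl h)
      · rcases List.mem_cons.mp hl with rfl | hl
        · exact Or.inl (Or.inr ⟨hr, hp⟩)
        · exact Or.inr ⟨l, hl, hr, hp⟩

-- A's column j, built char by char, is the map over the rows
theorem column_eq_map (lines : List String) (j : Int) :
    (PySem.List.pyRange 0 (lines.length : Int) 1).foldl
      (fun col i => col ++ [pvCharAt lines i j]) []
    = lines.map (fun s => PySem.List.pyGetD s.toList j ' ') := by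
  rw [PySem.List.foldl_append_singleton_eq_map]
  simp only [List.nil_append, pvCharAt]
  rw [show (fun i => PySem.List.pyGetD (PySem.List.pyGetD lines i "").toList j ' ')
        = (fun s : String => PySem.List.pyGetD s.toList j ' ') ∘ (fun i => PySem.List.pyGetD lines i "") from rfl,
      ← List.map_map]
  rw [show ((lines.length : Int)) = PySem.List.len lines by simp [PySem.List.len],
    PySem.List.map_pyGetD_pyRange_zero]

-- line_is_empty is the negation of any-'#'
theorem line_is_empty_eq (line : List Char) :
    line_is_empty line = ! line.any (fun c => c == '#') := by
  unfold line_is_empty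
  rw [PySem.List.foldl_if_false_eq]
  simp only [Bool.true_and]
  have h := PySem.List.map_pyGetD_pyRange_zero line ' '
  rw [show ((line.length : Int)) = PySem.List.len line by simp [PySem.List.len]]
  conv_rhs => rw [← h, List.any_map]
  rfl

theorem get_empty_column_indices_eq_filter (lines : List String) :
    get_empty_column_indices lines
    = (PySem.List.pyRange 0 (PySem.Str.len (PySem.List.pyGetD lines 0 "")) 1).filter
        (fun j => ! lines.any (fun s => PySem.List.pyGetD s.toList j ' ' == '#')) := by
  unfold get_empty_column_indices
  rw [PySem.List.foldl_append_if_eq_filter]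
  simp only [List.nil_append]
  apply List.filter_congr
  intro j _
  rw [column_eq_map, line_is_empty_eq, List.any_map]
  rfl

-- ===== VERDICT (by name: the statement is the Claim_ definition above) =====
theorem get_empty_column_indices_spec : Claim_equal_get_empty_column_indices := by
  intro lines _ _
  unfold Spec_get_empty_column_indices get_empty_column_indices_alt
  rw [get_empty_column_indices_eq_filter]
  dsimp only
  apply List.filter_congr
  intro j hj
  congr 1
  rw [Bool.eq_iff_iff, List.any_eq_true, PySem.Set.contains_iff, mem_nonempty_fold]
  simp only [PySem.Set.empty, List.not_mem_nil, false_or]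
  constructor
  · rintro ⟨l, hl, hp⟩
    exact ⟨l, hl, hj, hp⟩
  · rintro ⟨l, hl, _, hp⟩
    exact ⟨l, hl, hp⟩
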